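-- pv_equiv track=rewrite | github.com/MassilAit/BNN | XOR4/build_class_dc_db.py | apply_perm_key
-- ===== SOURCE A (Python) =====
-- from typing import List, Dict
--
-- def apply_perm_key(key: int, row_map: List[int]) -> int:
--     """Return packed key after permuting input bits."""
--     care, value = key >> 16, key & 0xFFFF
--     new_care = new_value = 0
--     for old, new in enumerate(row_map):
--         if (care >> old) & 1:
--             new_care  |= 1 << new
--             if (value >> old) & 1:
--                 new_value |= 1 << new
--     return (new_care << 16) | new_value
-- ===== SOURCE B (Python) =====
-- def apply_perm_key(key, row_map):
--     """Return packed key after permuting input bits."""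
--     def permute(mask):
--         out = 0
--         for old, new in enumerate(row_map):
--             if (mask >> old) & 1:
--                 out |= 1 << new
--         return out
--     care = key >> 16
--     return (permute(care) << 16) | permute(care & (key & 0xFFFF))
-- ===== Notes on version B (the rewrite author's own statement) =====
-- stated objective: simpler
-- what changed: B replaces A's single fused loop with a nested conditional by one reusable permute(mask) helper applied twice, to care and to care & value, exploiting that a value bit contributes only when its care bit is set.
import Mathlib
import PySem

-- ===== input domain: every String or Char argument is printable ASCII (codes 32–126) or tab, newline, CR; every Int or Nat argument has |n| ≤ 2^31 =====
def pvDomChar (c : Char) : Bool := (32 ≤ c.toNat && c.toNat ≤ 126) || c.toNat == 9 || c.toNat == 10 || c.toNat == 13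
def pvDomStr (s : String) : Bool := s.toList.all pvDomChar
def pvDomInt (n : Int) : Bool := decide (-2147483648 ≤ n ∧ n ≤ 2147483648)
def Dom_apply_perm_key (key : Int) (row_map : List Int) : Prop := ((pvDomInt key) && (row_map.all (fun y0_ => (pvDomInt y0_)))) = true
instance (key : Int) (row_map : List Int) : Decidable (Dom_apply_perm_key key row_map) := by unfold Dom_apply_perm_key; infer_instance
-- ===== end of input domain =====

-- B factors the fused loop into one reusable bit-permutation helper applied twice (to care and to
-- care & value), eliminating the nested conditional; same O(n) cost, simpler decomposition.

-- ===== PORT A =====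
def apply_perm_key (key : Int) (row_map : List Int) : Int :=
  let care := key >>> 16
  let value := PySem.Int.band key 65535
  let r := row_map.zipIdx.foldl (fun (st : Int × Int) (p : Int × Nat) =>
    if PySem.Int.band (care >>> p.2) 1 = 1 then
      (PySem.Int.bor st.1 ((1 : Int) <<< p.1.toNat),
       if PySem.Int.band (value >>> p.2) 1 = 1 then PySem.Int.bor st.2 ((1 : Int) <<< p.1.toNat)
       else st.2)
    else st) ((0 : Int), (0 : Int))
  PySem.Int.bor (r.1 <<< 16) r.2

-- ===== PORT B =====
-- B's helper permute(mask): OR 1 << row_map[old] for every old bit set in mask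
def pvPermute (row_map : List Int) (mask : Int) : Int :=
  row_map.zipIdx.foldl (fun (acc : Int) (p : Int × Nat) =>
    if PySem.Int.band (mask >>> p.2) 1 = 1 then PySem.Int.bor acc ((1 : Int) <<< p.1.toNat)
    else acc) 0

def apply_perm_key_alt (key : Int) (row_map : List Int) : Int :=
  let care := key >>> 16
  PySem.Int.bor (pvPermute row_map care <<< 16)
    (pvPermute row_map (PySem.Int.band care (PySem.Int.band key 65535)))

-- ===== PRECONDITION & SPEC =====
-- Pre_ excludes exactly the inputs where Python A raises ValueError: a negative row_map entry at a
-- position whose care bit (bit 16+i of key) is set makes A execute `1 << negative`.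
def Pre_apply_perm_key (key : Int) (row_map : List Int) : Prop :=
  ∀ p ∈ row_map.zipIdx, PySem.Int.band ((key >>> 16) >>> p.2) 1 = 1 → 0 ≤ p.1
instance (key : Int) (row_map : List Int) : Decidable (Pre_apply_perm_key key row_map) := by
  unfold Pre_apply_perm_key; infer_instance

def pvWitness_apply_perm_key : Int × List Int := (327683, [0, 1])

def Spec_apply_perm_key (key : Int) (row_map : List Int) (out : Int) : Prop :=
  out = apply_perm_key_alt key row_map
instance (key : Int) (row_map : List Int) (out : Int) : Decidable (Spec_apply_perm_key key row_map out) := by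
  unfold Spec_apply_perm_key; infer_instance

-- ===== CLAIM (what is proved, stated in full; the proofs are below) =====
def Claim_equal_apply_perm_key : Prop := ∀ (key : Int) (row_map : List Int), Dom_apply_perm_key key row_map → Pre_apply_perm_key key row_map → Spec_apply_perm_key key row_map (apply_perm_key key row_map)

-- ===== LEMMAS AND PROOFS =====

-- evaluation of PySem.Int.band on the four sign shapes
theorem pvBand_ofNat_ofNat (m n : Nat) :
    PySem.Int.band (Int.ofNat m) (Int.ofNat n) = Int.ofNat (m &&& n) := by
  simp [PySem.Int.band]

theorem pvBand_ofNat_negSucc (m n : Nat) :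
    PySem.Int.band (Int.ofNat m) (Int.negSucc n) = Int.ofNat (m - (m &&& n)) := by
  simp [PySem.Int.band, Int.negSucc_eq]
  omega

theorem pvBand_negSucc_ofNat (m n : Nat) :
    PySem.Int.band (Int.negSucc m) (Int.ofNat n) = Int.ofNat (n - (n &&& m)) := by
  simp [PySem.Int.band, Int.negSucc_eq]
  omega

theorem pvBand_negSucc_negSucc (m n : Nat) :
    PySem.Int.band (Int.negSucc m) (Int.negSucc n) = Int.negSucc (m ||| n) := by
  simp [PySem.Int.band, Int.negSucc_eq]
  split_ifs <;> omega

theorem pvOfNat_shiftRight (m k : Nat) : (Int.ofNat m) >>> k = Int.ofNat (m >>> k) := rfl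

theorem pvNegSucc_shiftRight (m k : Nat) : (Int.negSucc m) >>> k = Int.negSucc (m >>> k) := rfl

theorem pvNat_and_mod2 (m n : Nat) : (m &&& n) % 2 = m % 2 * (n % 2) := by
  have h' : (m &&& n) % 2 = 1 ↔ (m % 2 = 1 ∧ n % 2 = 1) := by simp
  rcases Nat.mod_two_eq_zero_or_one m with hm | hm <;>
    rcases Nat.mod_two_eq_zero_or_one n with hn | hn <;> rw [hm, hn] <;> omega

theorem pvNat_or_mod2 (m n : Nat) : ((m ||| n) % 2 = 1) ↔ (m % 2 = 1 ∨ n % 2 = 1) := by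
  simp

theorem pvSub_and_shiftRight (k m n : Nat) :
    (m - (m &&& n)) >>> k = m >>> k - (m >>> k &&& n >>> k) := by
  induction k generalizing m n with
  | zero => simp
  | succ k ih =>
    have hle : m &&& n ≤ m := Nat.and_le_left
    have hp : (m &&& n) % 2 ≤ m % 2 := by
      have := pvNat_and_mod2 m n
      rcases Nat.mod_two_eq_zero_or_one n with hn | hn <;> rw [hn] at this <;> omega
    have h2 : (m - (m &&& n)) / 2 = m / 2 - (m / 2 &&& n / 2) := by
      rw [← Nat.and_div_two]
      omega
    rw [Nat.shiftRight_succ_inside, h2, ih, Nat.shiftRight_succ_inside,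
      Nat.shiftRight_succ_inside]

theorem pvBand_shiftRight (a b : Int) (k : Nat) :
    (PySem.Int.band a b) >>> k = PySem.Int.band (a >>> k) (b >>> k) := by
  rcases a with m | m <;> rcases b with n | n
  · rw [pvBand_ofNat_ofNat, pvOfNat_shiftRight, pvOfNat_shiftRight, pvOfNat_shiftRight,
      pvBand_ofNat_ofNat, Nat.shiftRight_and_distrib]
  · rw [pvBand_ofNat_negSucc, pvOfNat_shiftRight, pvOfNat_shiftRight, pvNegSucc_shiftRight,
      pvBand_ofNat_negSucc, pvSub_and_shiftRight]
  · rw [pvBand_negSucc_ofNat, pvOfNat_shiftRight, pvNegSucc_shiftRight, pvOfNat_shiftRight,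
      pvBand_negSucc_ofNat, pvSub_and_shiftRight]
  · rw [pvBand_negSucc_negSucc, pvNegSucc_shiftRight, pvNegSucc_shiftRight, pvNegSucc_shiftRight,
      pvBand_negSucc_negSucc, Nat.shiftRight_or_distrib]

theorem pvMod2_band (a b : Int) :
    (PySem.Int.band a b) % 2 = 1 ↔ (a % 2 = 1 ∧ b % 2 = 1) := by
  rcases a with m | m <;> rcases b with n | n
  · rw [pvBand_ofNat_ofNat]
    have h := pvNat_and_mod2 m n
    rcases Nat.mod_two_eq_zero_or_one m with hm | hm <;>
      rcases Nat.mod_two_eq_zero_or_one n with hn | hn <;> rw [hm, hn] at h <;>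
        simp only [Int.ofNat_eq_natCast] <;> omega
  · rw [pvBand_ofNat_negSucc, Int.negSucc_eq]
    have h := pvNat_and_mod2 m n
    have hle : m &&& n ≤ m := Nat.and_le_left
    rcases Nat.mod_two_eq_zero_or_one m with hm | hm <;>
      rcases Nat.mod_two_eq_zero_or_one n with hn | hn <;> rw [hm, hn] at h <;>
        simp only [Int.ofNat_eq_natCast] <;> omega
  · rw [pvBand_negSucc_ofNat, Int.negSucc_eq]
    have h := pvNat_and_mod2 n m
    have hle : n &&& m ≤ n := Nat.and_le_left
    rcases Nat.mod_two_eq_zero_or_one m with hm | hm <;>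
      rcases Nat.mod_two_eq_zero_or_one n with hn | hn <;> rw [hm, hn] at h <;>
        simp only [Int.ofNat_eq_natCast] <;> omega
  · rw [pvBand_negSucc_negSucc, Int.negSucc_eq, Int.negSucc_eq]
    have h := pvNat_or_mod2 m n
    omega

-- bit k of care & value is set iff bit k of care and bit k of value are both set
theorem pvBit_band (a b : Int) (k : Nat) :
    PySem.Int.band (PySem.Int.band a b >>> k) 1 = 1 ↔
      (PySem.Int.band (a >>> k) 1 = 1 ∧ PySem.Int.band (b >>> k) 1 = 1) := by
  rw [PySem.Int.band_one, PySem.Int.band_one, PySem.Int.band_one,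
    PySem.Int.mod_eq_emod_of_pos (by norm_num), PySem.Int.mod_eq_emod_of_pos (by norm_num),
    PySem.Int.mod_eq_emod_of_pos (by norm_num), pvBand_shiftRight]
  exact pvMod2_band _ _

-- A's fused loop is the pair of B's two flat permutation passes
theorem pvLoop (care value : Int) (l : List (Int × Nat)) (c v : Int) :
    l.foldl (fun (st : Int × Int) (p : Int × Nat) =>
      if PySem.Int.band (care >>> p.2) 1 = 1 then
        (PySem.Int.bor st.1 ((1 : Int) <<< p.1.toNat),
         if PySem.Int.band (value >>> p.2) 1 = 1 then PySem.Int.bor st.2 ((1 : Int) <<< p.1.toNat)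
         else st.2)
      else st) (c, v)
    = (l.foldl (fun (acc : Int) (p : Int × Nat) =>
        if PySem.Int.band (care >>> p.2) 1 = 1 then PySem.Int.bor acc ((1 : Int) <<< p.1.toNat)
        else acc) c,
       l.foldl (fun (acc : Int) (p : Int × Nat) =>
        if PySem.Int.band (PySem.Int.band care value >>> p.2) 1 = 1 then
          PySem.Int.bor acc ((1 : Int) <<< p.1.toNat)
        else acc) v) := by
  induction l generalizing c v with
  | nil => rfl
  | cons p l ih =>
    simp only [List.foldl_cons]
    have h3 := pvBit_band care value p.2
    by_cases h1 : PySem.Int.band (care >>> p.2) 1 = 1 <;>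
      by_cases h2 : PySem.Int.band (value >>> p.2) 1 = 1
    · rw [if_pos h1, if_pos h2, if_pos h1, if_pos (h3.mpr ⟨h1, h2⟩)]
      exact ih _ _
    · rw [if_pos h1, if_neg h2, if_pos h1, if_neg (fun hc => h2 (h3.mp hc).2)]
      exact ih _ _
    · rw [if_neg h1, if_neg h1, if_neg (fun hc => h1 (h3.mp hc).1)]
      exact ih _ _
    · rw [if_neg h1, if_neg h1, if_neg (fun hc => h1 (h3.mp hc).1)]
      exact ih _ _

theorem pvMain (key : Int) (row_map : List Int) :
    apply_perm_key key row_map = apply_perm_key_alt key row_map := by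
  simp only [apply_perm_key, apply_perm_key_alt, pvPermute, pvLoop]

-- ===== VERDICT (by name: the statement is the Claim_ definition above) =====
theorem apply_perm_key_spec : Claim_equal_apply_perm_key := by
  intro key row_map _ _
  unfold Spec_apply_perm_key
  exact pvMain key row_map
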